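-- pv_equiv track=rewrite | github.com/zvirb/songnodes | services/gold-to-operational-etl/gold_to_operational_etl.py | is_valid_artist_name
-- ===== SOURCE A (Python) =====
-- from typing import Optional, Dict, List, Set
--
-- INVALID_ARTIST_PATTERNS = {
--     'unknown', 'unknown artist', 'unknown artist @',
--     'various', 'various artists', 'various artist', 'va', 'va @',
--     '[unknown]', '(unknown)', 'n/a', 'tba', 'tbd'
-- }
--
-- def is_valid_artist_name(artist_name: Optional[str]) -> bool:
--     """
--     Validate artist name per CLAUDE.md requirements.
--
--     Invalid patterns:
--     - NULL, empty string
--     - "Unknown", "Unknown Artist", "Various Artists", etc.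
--     """
--     if not artist_name or not artist_name.strip():
--         return False
--
--     normalized = artist_name.lower().strip()
--
--     # Check exact matches
--     if normalized in INVALID_ARTIST_PATTERNS:
--         return False
--
--     # Check prefixes
--     for pattern in INVALID_ARTIST_PATTERNS:
--         if normalized.startswith(pattern + ' ') or normalized.startswith(pattern + '@'):
--             return False
--
--     return True
-- ===== SOURCE B (Python) =====
-- from typing import Optional
--
-- INVALID_ARTIST_PATTERNS = {
--     'unknown', 'unknown artist', 'unknown artist @',
--     'various', 'various artists', 'various artist', 'va', 'va @',
--     '[unknown]', '(unknown)', 'n/a', 'tba', 'tbd'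
-- }
--
-- def is_valid_artist_name(artist_name: Optional[str]) -> bool:
--     if not artist_name or not artist_name.strip():
--         return False
--     normalized = artist_name.lower().strip()
--     # One unified scan: every prefix that ends at a ' '/'@' boundary, and finally
--     # the whole string, is looked up in the set; a hit means invalid.
--     prefix = []
--     for ch in normalized:
--         if ch in ' @' and ''.join(prefix) in INVALID_ARTIST_PATTERNS:
--             return False
--         prefix.append(ch)
--     return ''.join(prefix) not in INVALID_ARTIST_PATTERNS
-- ===== Notes on version B (the rewrite author's own statement) =====
-- stated objective: alternative
-- what changed: A's two staged checks (exact set membership, then a loop over the pattern set calling startswith twice per pattern) are replaced by one recursive left-to-right scan of the name that accumulates a prefix and looks it up in the set at each ' '/'@' boundary, with the whole string looked up at the end.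
import Mathlib
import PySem

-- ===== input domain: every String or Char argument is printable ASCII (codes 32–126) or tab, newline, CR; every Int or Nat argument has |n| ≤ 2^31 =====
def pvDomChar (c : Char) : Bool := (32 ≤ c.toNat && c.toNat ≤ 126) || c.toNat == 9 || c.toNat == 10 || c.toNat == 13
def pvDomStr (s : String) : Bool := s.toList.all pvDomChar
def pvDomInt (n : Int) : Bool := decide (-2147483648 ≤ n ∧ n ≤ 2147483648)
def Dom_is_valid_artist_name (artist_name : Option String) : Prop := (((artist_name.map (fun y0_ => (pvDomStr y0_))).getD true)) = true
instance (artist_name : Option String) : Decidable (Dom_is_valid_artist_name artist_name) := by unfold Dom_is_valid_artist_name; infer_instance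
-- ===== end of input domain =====

-- B's change (alternative): A's exact-match test plus a loop over the pattern set doing
-- startswith is replaced by ONE recursive scan of the name that looks accumulated
-- prefixes up in the set at each ' '/'@' boundary and the whole string at the end.

-- ===== PORT A =====
-- the module constant INVALID_ARTIST_PATTERNS (a Python set; both programs use it)
def invalidArtistPatterns : PySem.Set String :=
  PySem.Set.ofList ["unknown", "unknown artist", "unknown artist @",
    "various", "various artists", "various artist", "va", "va @",
    "[unknown]", "(unknown)", "n/a", "tba", "tbd"]

-- A iterates the set in hash order, but any hit returns False, so the result is
-- order-independent; the port iterates the Set's element list.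
def is_valid_artist_name (artist_name : Option String) : Bool :=
  match artist_name with
  | none => false
  | some s =>
    if s = "" || PySem.Str.strip s = "" then false
    else
      let normalized := PySem.Str.strip (PySem.Str.lower s)
      if PySem.Set.contains invalidArtistPatterns normalized then false
      else if invalidArtistPatterns.any (fun p =>
          PySem.Str.startswith normalized (p ++ " ") ||
          PySem.Str.startswith normalized (p ++ "@")) then false
      else true

-- ===== PORT B =====
-- the for-loop of Source B: `prefix` is the accumulated list of chars already seen
def prefixScan (pre : List Char) (rest : List Char) : Bool :=
  match rest with
  | [] => ! PySem.Set.contains invalidArtistPatterns (String.ofList pre)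
  | ch :: rest' =>
    if (ch == ' ' || ch == '@') &&
        PySem.Set.contains invalidArtistPatterns (String.ofList pre) then false
    else prefixScan (pre ++ [ch]) rest'

def is_valid_artist_name_alt (artist_name : Option String) : Bool :=
  match artist_name with
  | none => false
  | some s =>
    if s = "" || PySem.Str.strip s = "" then false
    else prefixScan [] (PySem.Str.strip (PySem.Str.lower s)).toList

-- ===== PRECONDITION & SPEC =====
def Spec_is_valid_artist_name (artist_name : Option String) (out : Bool) : Prop := out = is_valid_artist_name_alt artist_name
instance (artist_name : Option String) (out : Bool) : Decidable (Spec_is_valid_artist_name artist_name out) := by unfold Spec_is_valid_artist_name; infer_instance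

-- ===== CLAIM (what is proved, stated in full; the proofs are below) =====
def Claim_equal_is_valid_artist_name : Prop := ∀ (artist_name : Option String), Dom_is_valid_artist_name artist_name → Spec_is_valid_artist_name artist_name (is_valid_artist_name artist_name)

-- ===== LEMMAS AND PROOFS =====

-- Set.contains on the pattern set is list membership
lemma mem_iff (x : String) :
    PySem.Set.contains invalidArtistPatterns x = true ↔ x ∈ invalidArtistPatterns := by
  simp [PySem.Set.contains]

-- p ++ [c] is a prefix of l iff some position k carries c with l.take k = p
lemma prefix_append_singleton_iff {α : Type} (p : List α) (c : α) (l : List α) :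
    p ++ [c] <+: l ↔ ∃ (k : Nat) (h : k < l.length), l.take k = p ∧ l[k] = c := by
  constructor
  · rintro ⟨t, ht⟩
    refine ⟨p.length, ?_, ?_, ?_⟩ <;> subst ht <;> simp
  · rintro ⟨k, hk, htake, hget⟩
    refine ⟨l.drop (k+1), ?_⟩
    have : l = l.take k ++ l[k] :: l.drop (k+1) := by
      conv_lhs => rw [← List.take_append_drop k l, List.drop_eq_getElem_cons hk]
    rw [htake, hget] at this
    simpa using this.symm

-- the scan returns true iff neither a boundary prefix nor the whole string is a pattern
lemma prefixScan_spec (rest : List Char) : ∀ (pre : List Char),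
    prefixScan pre rest = true ↔
      (String.ofList (pre ++ rest) ∉ invalidArtistPatterns ∧
       ∀ (k : Nat) (h : k < rest.length), (rest[k] = ' ' ∨ rest[k] = '@') →
         String.ofList (pre ++ rest.take k) ∉ invalidArtistPatterns) := by
  induction rest with
  | nil =>
    intro pre
    simp [prefixScan, PySem.Set.contains]
  | cons c cs ih =>
    intro pre
    by_cases hb : (c = ' ' ∨ c = '@') ∧ String.ofList pre ∈ invalidArtistPatterns
    · have hcond : ((c == ' ' || c == '@') &&
          PySem.Set.contains invalidArtistPatterns (String.ofList pre)) = true := by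
        simp only [Bool.and_eq_true, Bool.or_eq_true, beq_iff_eq]
        exact ⟨hb.1, (mem_iff _).mpr hb.2⟩
      rw [prefixScan, if_pos hcond]
      constructor
      · intro hfalse; exact absurd hfalse (by simp)
      · rintro ⟨_, hall⟩
        have h0 := hall 0 (by simp) (by simpa using hb.1)
        simp only [List.take_zero, List.append_nil] at h0
        exact absurd hb.2 h0
    · have hcond : ¬(((c == ' ' || c == '@') &&
          PySem.Set.contains invalidArtistPatterns (String.ofList pre)) = true) := by
        simp only [Bool.and_eq_true, Bool.or_eq_true, beq_iff_eq, mem_iff]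
        exact hb
      rw [prefixScan, if_neg hcond, ih (pre ++ [c])]
      constructor
      · rintro ⟨hfull, hall⟩
        refine ⟨by simpa [List.append_assoc] using hfull, ?_⟩
        intro k hk hck
        match k with
        | 0 =>
          simp only [List.take_zero, List.append_nil]
          intro hm
          exact hb ⟨by simpa using hck, hm⟩
        | k' + 1 =>
          have := hall k' (by simpa using hk) (by simpa using hck)
          simpa [List.take_succ_cons, List.append_assoc] using this
      · rintro ⟨hfull, hall⟩
        refine ⟨by simpa [List.append_assoc] using hfull, ?_⟩
        intro k hk hck
        have := hall (k + 1) (by simpa using hk) (by simpa using hck)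
        simpa [List.take_succ_cons, List.append_assoc] using this

-- A's pattern loop, as a statement about boundary positions in n
lemma anyLoop_iff (n : String) :
    (invalidArtistPatterns.any fun p =>
        PySem.Str.startswith n (p ++ " ") ||
        PySem.Str.startswith n (p ++ "@")) = true ↔
      ∃ (k : Nat) (h : k < n.toList.length), (n.toList[k] = ' ' ∨ n.toList[k] = '@') ∧
        String.ofList (n.toList.take k) ∈ invalidArtistPatterns := by
  simp only [List.any_eq_true, Bool.or_eq_true, PySem.Str.startswith_eq,
    PySem.Chars.startswith_iff, String.toList_append]
  constructor
  · rintro ⟨p, hp, h | h⟩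
    · rw [show (" " : String).toList = [' '] from rfl, prefix_append_singleton_iff] at h
      obtain ⟨k, hk, htake, hget⟩ := h
      exact ⟨k, hk, Or.inl hget, by rw [htake]; simpa using hp⟩
    · rw [show ("@" : String).toList = ['@'] from rfl, prefix_append_singleton_iff] at h
      obtain ⟨k, hk, htake, hget⟩ := h
      exact ⟨k, hk, Or.inr hget, by rw [htake]; simpa using hp⟩
  · rintro ⟨k, hk, hc | hc, hmem⟩
    · refine ⟨String.ofList (n.toList.take k), hmem, Or.inl ?_⟩
      rw [show (" " : String).toList = [' '] from rfl, String.toList_ofList,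
        prefix_append_singleton_iff]
      exact ⟨k, hk, rfl, hc⟩
    · refine ⟨String.ofList (n.toList.take k), hmem, Or.inr ?_⟩
      rw [show ("@" : String).toList = ['@'] from rfl, String.toList_ofList,
        prefix_append_singleton_iff]
      exact ⟨k, hk, rfl, hc⟩

-- A's two staged checks together equal B's single scan
lemma main_eq (n : String) :
    (if PySem.Set.contains invalidArtistPatterns n then false
     else if invalidArtistPatterns.any (fun p =>
         PySem.Str.startswith n (p ++ " ") ||
         PySem.Str.startswith n (p ++ "@")) then false
     else true) = prefixScan [] n.toList := by
  rw [show ∀ a b : Bool, (if a = true then false else if b = true then false else true)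
      = (!a && !b) from by decide]
  rw [Bool.eq_iff_iff, prefixScan_spec]
  simp only [Bool.and_eq_true, Bool.not_eq_true', List.nil_append, String.ofList_toList]
  constructor
  · rintro ⟨ha, hb⟩
    constructor
    · intro hm
      rw [(mem_iff n).mpr hm] at ha; cases ha
    · intro k hk hck hm
      rw [(anyLoop_iff n).mpr ⟨k, hk, hck, hm⟩] at hb; cases hb
  · rintro ⟨hfull, hall⟩
    refine ⟨Bool.eq_false_iff.mpr (fun h => hfull ((mem_iff n).mp h)),
            Bool.eq_false_iff.mpr (fun h => ?_)⟩
    obtain ⟨k, hk, hck, hm⟩ := (anyLoop_iff n).mp h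
    exact hall k hk hck hm

-- ===== VERDICT (by name: the statement is the Claim_ definition above) =====
theorem is_valid_artist_name_spec : Claim_equal_is_valid_artist_name := by
  intro artist_name _
  unfold Spec_is_valid_artist_name is_valid_artist_name is_valid_artist_name_alt
  cases artist_name with
  | none => rfl
  | some s =>
    dsimp only
    by_cases hg : (decide (s = "") || decide (PySem.Str.strip s = "")) = true
    · rw [if_pos hg, if_pos hg]
    · rw [if_neg hg, if_neg hg]
      exact main_eq (PySem.Str.strip (PySem.Str.lower s))
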